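-- pv_equiv track=rewrite | github.com/Sungshine/BioFirstAidKit | scripts-cims/run_detector.py | wrangle_paired_ends
-- ===== SOURCE A (Python) =====
-- def wrangle_paired_ends(fps):
--     """ Match paired-end read files. """
--     pair_hash = {}
--     for fp in fps:
--         newfile = ""
--         if '_R1' in fp:
--             newfile = fp.replace('_R1', '_R*')
--         elif '_R2' in fp:
--             newfile = fp.replace('_R2', '_R*')
--         if newfile not in pair_hash:
--             pair_hash[newfile] = [fp]
--         else:
--             pair_hash[newfile].append(fp)
--     return pair_hash
-- ===== SOURCE B (Python) =====
-- def wrangle_paired_ends(fps):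
--     """ Match paired-end read files. """
--     def key(fp):
--         if '_R1' in fp:
--             return fp.replace('_R1', '_R*')
--         if '_R2' in fp:
--             return fp.replace('_R2', '_R*')
--         return ""
--     ks = [key(fp) for fp in fps]
--     return {k: [fp for fp, kk in zip(fps, ks) if kk == k]
--             for k in dict.fromkeys(ks)}
-- ===== Notes on version B (the rewrite author's own statement) =====
-- stated objective: alternative
-- what changed: Replaces the single mutating dict-building loop by a two-phase functional formulation: compute each file's normalized key once, deduplicate the keys in first-occurrence order with dict.fromkeys, and build the result as a dict comprehension that collects each group by filtering the input list.
import Mathlib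
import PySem

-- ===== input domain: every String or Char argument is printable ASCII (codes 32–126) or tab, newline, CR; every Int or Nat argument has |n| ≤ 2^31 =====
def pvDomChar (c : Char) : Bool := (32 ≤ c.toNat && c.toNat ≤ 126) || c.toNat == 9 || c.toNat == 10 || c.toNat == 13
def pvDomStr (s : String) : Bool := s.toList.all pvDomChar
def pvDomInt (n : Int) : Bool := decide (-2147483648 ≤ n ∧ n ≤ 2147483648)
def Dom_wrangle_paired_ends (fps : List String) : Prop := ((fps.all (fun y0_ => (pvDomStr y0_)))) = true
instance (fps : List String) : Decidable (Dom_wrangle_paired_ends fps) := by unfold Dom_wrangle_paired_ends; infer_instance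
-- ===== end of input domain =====

-- B replaces A's mutating dict-building loop by computing each file's key once, deduplicating the
-- keys in first-occurrence order, and grouping by filtering the input (alternative decomposition,
-- same cost class). Return-value equivalence only; neither version mutates its argument.

-- ===== PORT A =====
def wrangle_paired_ends (fps : List String) : List (String × List String) :=
  (fps.foldl (fun pair_hash fp =>
      let newfile : String := ""
      let newfile := if PySem.Str.isIn "_R1" fp then PySem.Str.replace fp "_R1" "_R*"
                     else if PySem.Str.isIn "_R2" fp then PySem.Str.replace fp "_R2" "_R*"
                     else newfile
      if !(pair_hash.contains newfile) then pair_hash.insert newfile [fp]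
      else pair_hash.modify newfile [] (fun l => l ++ [fp]))
    (PySem.Dict.empty : PySem.Dict String (List String))).items

-- ===== PORT B =====
def pvKey (fp : String) : String :=
  if PySem.Str.isIn "_R1" fp then PySem.Str.replace fp "_R1" "_R*"
  else if PySem.Str.isIn "_R2" fp then PySem.Str.replace fp "_R2" "_R*"
  else ""

def wrangle_paired_ends_alt (fps : List String) : List (String × List String) :=
  let ks := fps.map pvKey
  (PySem.List.dedup ks).map (fun k =>
    (k, ((fps.zip ks).filter (fun p => p.2 == k)).map Prod.fst))

-- ===== PRECONDITION & SPEC =====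
def Spec_wrangle_paired_ends (fps : List String) (out : List (String × List String)) : Prop := out = wrangle_paired_ends_alt fps
instance (fps : List String) (out : List (String × List String)) : Decidable (Spec_wrangle_paired_ends fps out) := by unfold Spec_wrangle_paired_ends; infer_instance

-- ===== CLAIM (what is proved, stated in full; the proofs are below) =====
def Claim_equal_wrangle_paired_ends : Prop := ∀ (fps : List String), Dom_wrangle_paired_ends fps → Spec_wrangle_paired_ends fps (wrangle_paired_ends fps)

-- ===== LEMMAS AND PROOFS =====

-- the group map both programs compute, in its simplest form
def pvG (xs : List String) : List (String × List String) :=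
  (PySem.List.dedup (xs.map pvKey)).map (fun k => (k, xs.filter (fun fp => pvKey fp == k)))

lemma pv_zip_filter (k : String) (xs : List String) :
    ((xs.zip (xs.map pvKey)).filter (fun p => p.2 == k)).map Prod.fst
      = xs.filter (fun fp => pvKey fp == k) := by
  induction xs with
  | nil => rfl
  | cons x t ih =>
      simp only [List.map_cons, List.zip_cons_cons, List.filter_cons]
      by_cases h : pvKey x == k
      · simp [h, ih]
      · simp [h, ih]

lemma pv_alt_eq_pvG (fps : List String) : wrangle_paired_ends_alt fps = pvG fps := by
  unfold wrangle_paired_ends_alt pvG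
  simp only [pv_zip_filter]

lemma pv_dedup_snoc (l : List String) (a : String) :
    PySem.List.dedup (l ++ [a])
      = if a ∈ l then PySem.List.dedup l else PySem.List.dedup l ++ [a] := by
  simp only [PySem.List.dedup, PySem.Set.ofList_eq_foldl, List.foldl_append, List.foldl]
  simp only [PySem.Set.add, PySem.Set.contains, List.contains_eq_mem, ← PySem.Set.ofList_eq_foldl]
  by_cases h : a ∈ l
  · have : a ∈ PySem.Set.ofList l := by
      simpa [PySem.Set.mem_ofList] using h
    simp [h, this]
  · have : a ∉ PySem.Set.ofList l := by
      simpa [PySem.Set.mem_ofList] using h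
    simp [h, this]

lemma pv_any_pvG (xs : List String) (k : String) :
    (pvG xs).any (fun p => p.1 == k) = decide (k ∈ xs.map pvKey) := by
  unfold pvG
  rw [Bool.eq_iff_iff]
  simp [List.any_map, Function.comp_def, List.any_eq_true, PySem.Set.mem_ofList]

lemma pv_find_pair (g : String → List String) (k : String) :
    ∀ L : List String, k ∈ L →
      (L.map (fun k' => (k', g k'))).find? (fun p => p.1 == k) = some (k, g k) := by
  intro L
  induction L with
  | nil => simp
  | cons a t ih =>
      intro hmem
      by_cases h : a = k
      · subst h
        simp
      · have hne : (a == k) = false := by simpa using h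
        have hmem' : k ∈ t := by
          rcases List.mem_cons.mp hmem with h' | h'
          · exact absurd h'.symm h
          · exact h'
        simp [hne, ih hmem']

lemma pv_find_pvG (xs : List String) (k : String) (h : k ∈ xs.map pvKey) :
    (pvG xs).find? (fun p => p.1 == k)
      = some (k, xs.filter (fun fp => pvKey fp == k)) := by
  unfold pvG
  exact pv_find_pair _ k _ (by simpa [PySem.List.mem_dedup] using h)

lemma pv_main (xs : List String) :
    (xs.foldl (fun pair_hash fp =>
      let newfile : String := ""
      let newfile := if PySem.Str.isIn "_R1" fp then PySem.Str.replace fp "_R1" "_R*"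
                     else if PySem.Str.isIn "_R2" fp then PySem.Str.replace fp "_R2" "_R*"
                     else newfile
      if !(pair_hash.contains newfile) then pair_hash.insert newfile [fp]
      else pair_hash.modify newfile [] (fun l => l ++ [fp]))
    (PySem.Dict.empty : PySem.Dict String (List String))).items = pvG xs := by
  induction xs using List.reverseRecOn with
  | nil => rfl
  | append_singleton xs x ih =>
      rw [List.foldl_append, List.foldl_cons, List.foldl_nil]
      set d := xs.foldl (fun pair_hash fp =>
        let newfile : String := ""
        let newfile := if PySem.Str.isIn "_R1" fp then PySem.Str.replace fp "_R1" "_R*"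
                       else if PySem.Str.isIn "_R2" fp then PySem.Str.replace fp "_R2" "_R*"
                       else newfile
        if !(pair_hash.contains newfile) then pair_hash.insert newfile [fp]
        else pair_hash.modify newfile [] (fun l => l ++ [fp]))
        (PySem.Dict.empty : PySem.Dict String (List String)) with hd
      show (if !(d.contains (pvKey x)) then d.insert (pvKey x) [x]
            else d.modify (pvKey x) [] (fun l => l ++ [x])).items = pvG (xs ++ [x])
      have hcont : d.contains (pvKey x) = decide (pvKey x ∈ xs.map pvKey) := by
        rw [PySem.Dict.contains]
        show d.items.any (fun p => p.1 == pvKey x) = _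
        rw [ih, pv_any_pvG]
      by_cases hmem : pvKey x ∈ xs.map pvKey
      · -- existing key: modify appends x to its group, in place
        rw [if_neg (by simp [hcont, hmem])]
        rw [PySem.Dict.modify]
        have hgetD : d.getD (pvKey x) [] = xs.filter (fun fp => pvKey fp == pvKey x) := by
          rw [PySem.Dict.getD, PySem.Dict.get?]
          show (Option.map Prod.snd (d.items.find? (fun p => p.1 == pvKey x))).getD [] = _
          rw [ih, pv_find_pvG xs (pvKey x) hmem]
          rfl
        rw [PySem.Dict.insert, if_pos (by simp [hcont, hmem])]
        show (d.items.map fun p => if p.1 == pvKey x then (pvKey x, _) else p) = _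
        rw [ih, hgetD]
        unfold pvG
        rw [List.map_append]
        simp only [List.map_cons, List.map_nil]
        rw [pv_dedup_snoc, if_pos hmem, List.map_map]
        apply List.map_congr_left
        intro k hkmem
        by_cases hk : k = pvKey x
        · subst hk
          simp [List.filter_append]
        · have hxk : (pvKey x == k) = false := by simpa using (Ne.symm hk)
          simp [hxk, hk, List.filter_append]
      · -- new key: insert appends a fresh singleton group at the end
        rw [if_pos (by simp [hcont, hmem])]
        rw [PySem.Dict.insert, if_neg (by simp [hcont, hmem])]
        show d.items ++ [(pvKey x, [x])] = _
        rw [ih]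
        unfold pvG
        rw [List.map_append]
        simp only [List.map_cons, List.map_nil]
        rw [pv_dedup_snoc, if_neg hmem, List.map_append]
        congr 1
        · apply List.map_congr_left
          intro k hkmem
          have hkks : k ∈ xs.map pvKey := by
            simpa [PySem.List.mem_dedup] using hkmem
          have hxk : (pvKey x == k) = false := by
            simp only [beq_eq_false_iff_ne, ne_eq]
            intro h; exact hmem (h ▸ hkks)
          simp [List.filter_append, hxk]
        · have : xs.filter (fun fp => pvKey fp == pvKey x) = [] := by
            rw [List.filter_eq_nil_iff]
            intro fp hfp hbeq
            exact hmem (List.mem_map.mpr ⟨fp, hfp, by simpa using hbeq⟩)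
          simp [List.filter_append, this]

-- ===== VERDICT (by name: the statement is the Claim_ definition above) =====
theorem wrangle_paired_ends_spec : Claim_equal_wrangle_paired_ends := by
  intro fps _
  unfold Spec_wrangle_paired_ends
  rw [pv_alt_eq_pvG]
  exact pv_main fps
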